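-- pv_equiv track=rewrite | github.com/t1seo/ps_study | tseo/Programmers/level1/17681_비밀지도-1.py | solution
-- ===== SOURCE A (Python) =====
-- from collections import deque
--
-- def decode_row(row):
--     decoded_row = []
--     for box in row:
--         if box == "1":
--             decoded_row.append("#")
--         else:
--             decoded_row.append(" ")
--     return "".join(decoded_row)
--
-- def solution(n, arr_1, arr_2):
--
--     answer = []
--     for i in range(n):
--         # OR 연산 -> 2진법으로 바꾸기 -> 리스트로 바꾼 후 앞의 0b 제외
--         or_result = list(bin(arr_1[i] | arr_2[i]))[2:]
--         # 예) 111 -> 00111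
--         i = len(or_result)
--         while i < n:
--             dq = deque(or_result)
--             dq.appendleft(0)
--             i += 1
--             or_result = list(dq)
--         answer.append(decode_row(or_result))
--
--     return answer
-- ===== SOURCE B (Python) =====
-- def solution(n, arr_1, arr_2):
--     return [''.join('#' if c == '1' else ' ' for c in bin(arr_1[i] | arr_2[i])[2:].zfill(n))
--             for i in range(n)]
-- ===== Notes on version B (the rewrite author's own statement) =====
-- stated objective: faster
-- what changed: B replaces A's explicit loops -- the per-character deque-appendleft padding loop that rebuilds the deque as a list on every iteration and the decode_row character loop -- with a single comprehension per row using zfill for the padding and a join over the padded string.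
import Mathlib
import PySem

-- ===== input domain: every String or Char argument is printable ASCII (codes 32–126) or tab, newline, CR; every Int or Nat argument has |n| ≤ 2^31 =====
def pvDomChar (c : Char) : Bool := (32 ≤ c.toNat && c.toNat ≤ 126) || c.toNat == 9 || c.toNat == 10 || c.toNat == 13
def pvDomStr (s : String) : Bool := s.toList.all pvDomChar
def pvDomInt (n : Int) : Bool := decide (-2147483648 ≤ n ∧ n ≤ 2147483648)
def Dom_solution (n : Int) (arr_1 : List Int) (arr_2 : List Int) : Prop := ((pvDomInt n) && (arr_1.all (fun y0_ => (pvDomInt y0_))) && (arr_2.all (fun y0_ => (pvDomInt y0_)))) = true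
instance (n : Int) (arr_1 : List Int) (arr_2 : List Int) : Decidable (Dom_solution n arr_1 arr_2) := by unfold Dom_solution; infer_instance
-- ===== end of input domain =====

-- B builds each row in one comprehension (zfill for the padding, join over the padded string)
-- instead of A's per-character deque padding loop and decode_row character loop.

-- ===== PORT A =====
-- Python's or_result mixes one-character strings (from list(bin(...))) with the int 0
-- that the padding loop prepends; PyBox models that heterogeneous list explicitly.
inductive PyBox where
  | strc : Char → PyBox
  | int0 : PyBox
deriving DecidableEq, Repr

def decode_row (row : List PyBox) : String :=
  -- box == "1" is true only for the one-character string "1"; the int 0 never equals "1"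
  String.ofList (row.foldl (fun decoded box => decoded ++ [if box = PyBox.strc '1' then '#' else ' ']) [])

-- the 'while i < n: appendleft(0); i += 1' loop of A; fuel = the remaining iteration
-- count (n - i), only to make the recursion structural — the computation is the same
def padLoopF : Nat → Int → Int → List PyBox → List PyBox
  | 0, _, _, or_result => or_result
  | fuel + 1, n, i, or_result =>
    if i < n then padLoopF fuel n (i + 1) (PyBox.int0 :: or_result) else or_result

def padLoop (n : Int) (i : Int) (or_result : List PyBox) : List PyBox :=
  padLoopF (n - i).toNat n i or_result

def solution (n : Int) (arr_1 : List Int) (arr_2 : List Int) : List String :=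
  (PySem.List.pyRange 0 n 1).foldl (fun answer i =>
    let or_result : List PyBox :=
      PySem.List.slice (((PySem.Int.pyBin (PySem.Int.bor ((PySem.List.pyGet? arr_1 i).getD 0)
        ((PySem.List.pyGet? arr_2 i).getD 0))).toList).map PyBox.strc) (some 2) none
    answer ++ [decode_row (padLoop n (PySem.List.len or_result) or_result)]) []

-- ===== PORT B =====
-- bin(...)[2:].zfill(n) is ported on the character-list side (PySem.Chars.zfill);
-- ''.join over the characters is String.ofList of the List.map.
def solution_alt (n : Int) (arr_1 : List Int) (arr_2 : List Int) : List String :=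
  (PySem.List.pyRange 0 n 1).map (fun i =>
    String.ofList ((PySem.Chars.zfill
        (PySem.List.slice ((PySem.Int.pyBin (PySem.Int.bor ((PySem.List.pyGet? arr_1 i).getD 0)
          ((PySem.List.pyGet? arr_2 i).getD 0))).toList) (some 2) none) n).map
      (fun c => if c = '1' then '#' else ' ')))

-- ===== PRECONDITION & SPEC =====
-- Pre_ excludes exactly the inputs where A (and B) raise IndexError: n exceeding a list's length.
def Pre_solution (n : Int) (arr_1 : List Int) (arr_2 : List Int) : Prop :=
  n ≤ (arr_1.length : Int) ∧ n ≤ (arr_2.length : Int)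
instance (n : Int) (arr_1 : List Int) (arr_2 : List Int) : Decidable (Pre_solution n arr_1 arr_2) := by unfold Pre_solution; infer_instance
def pvWitness_solution : Int × List Int × List Int := (2, [9, 20], [30, 1])

def Spec_solution (n : Int) (arr_1 : List Int) (arr_2 : List Int) (out : List String) : Prop := out = solution_alt n arr_1 arr_2
instance (n : Int) (arr_1 : List Int) (arr_2 : List Int) (out : List String) : Decidable (Spec_solution n arr_1 arr_2 out) := by unfold Spec_solution; infer_instance

-- ===== CLAIM (what is proved, stated in full; the proofs are below) =====
def Claim_equal_solution : Prop := ∀ (n : Int) (arr_1 : List Int) (arr_2 : List Int), Dom_solution n arr_1 arr_2 → Pre_solution n arr_1 arr_2 → Spec_solution n arr_1 arr_2 (solution n arr_1 arr_2)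

-- ===== LEMMAS AND PROOFS =====

-- big-endian binary digit list, the value Nat.toDigits 2 computes
def pvBits (m : Nat) : List Char :=
  if m < 2 then [Nat.digitChar m] else pvBits (m / 2) ++ [Nat.digitChar (m % 2)]
termination_by m
decreasing_by omega

theorem pvBits_lt2 (m : Nat) (h : m < 2) : pvBits m = [Nat.digitChar m] := by
  rw [pvBits, if_pos h]

theorem pvBits_ge2 (m : Nat) (h : ¬ m < 2) :
    pvBits m = pvBits (m / 2) ++ [Nat.digitChar (m % 2)] := by
  rw [pvBits, if_neg h]

theorem pvToDigitsCore_eq (fuel : Nat) : ∀ (m : Nat) (ds : List Char), m < fuel →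
    Nat.toDigitsCore 2 fuel m ds = pvBits m ++ ds := by
  induction fuel with
  | zero => intro m ds h; omega
  | succ fuel ih =>
    intro m ds h
    rw [Nat.toDigitsCore]
    by_cases h2 : m / 2 = 0
    · have hm : m < 2 := by omega
      have hmod : m % 2 = m := by omega
      simp only [h2, pvBits_lt2 m hm, hmod]
      simp
    · have hrec := ih (m / 2) (Nat.digitChar (m % 2) :: ds) (by omega)
      simp only [if_neg h2, hrec, pvBits_ge2 m (by omega)]
      simp

theorem pvToDigits_eq_pvBits (m : Nat) : Nat.toDigits 2 m = pvBits m := by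
  rw [Nat.toDigits, pvToDigitsCore_eq (m + 1) m [] (by omega)]
  simp

theorem pvBits_mem (m : Nat) : ∀ c ∈ pvBits m, c = '0' ∨ c = '1' := by
  induction m using pvBits.induct with
  | case1 m h =>
    rw [pvBits_lt2 m h]
    intro c hc
    rw [List.mem_singleton] at hc
    subst hc
    interval_cases m
    · left; rfl
    · right; rfl
  | case2 m h ih =>
    rw [pvBits_ge2 m h]
    intro c hc
    rw [List.mem_append, List.mem_singleton] at hc
    rcases hc with hc | hc
    · exact ih c hc
    · subst hc
      rcases Nat.mod_two_eq_zero_or_one m with h2 | h2 <;> rw [h2]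
      · left; rfl
      · right; rfl

theorem pvBits_ne_nil (m : Nat) : pvBits m ≠ [] := by
  by_cases h : m < 2
  · rw [pvBits_lt2 m h]; simp
  · rw [pvBits_ge2 m h]; simp

theorem pvPadLoopF_eq (fuel : Nat) : ∀ (n i : Int) (xs : List PyBox), (n - i).toNat = fuel →
    padLoopF fuel n i xs = List.replicate fuel PyBox.int0 ++ xs := by
  induction fuel with
  | zero => intro n i xs _; rfl
  | succ fuel ih =>
    intro n i xs hf
    have hlt : i < n := by omega
    rw [padLoopF, if_pos hlt, ih n (i + 1) _ (by omega), List.replicate_succ']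
    simp

theorem pvPadLoop_eq (n i : Int) (xs : List PyBox) :
    padLoop n i xs = List.replicate (n - i).toNat PyBox.int0 ++ xs :=
  pvPadLoopF_eq (n - i).toNat n i xs rfl

theorem pvDecodeRow_eq (row : List PyBox) :
    decode_row row = String.ofList (row.map (fun b => if b = PyBox.strc '1' then '#' else ' ')) := by
  unfold decode_row
  rw [PySem.List.foldl_append_singleton_eq_map]
  simp

theorem pvZfill_no_sign (c : Char) (rest : List Char) (w : Int)
    (hs : ¬(c = '+' ∨ c = '-')) :
    PySem.Chars.zfill (c :: rest) w
      = List.replicate (w.toNat - (c :: rest).length) '0' ++ (c :: rest) := by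
  rw [PySem.Chars.zfill]
  by_cases hw : w ≤ (((c :: rest).length : Nat) : Int)
  · rw [if_pos hw]
    have h0 : w.toNat - (c :: rest).length = 0 := by omega
    rw [h0]
    simp
  · rw [if_neg hw]
    simp only [if_neg hs]

-- the single-row equality: A's decoded, padded row equals B's mapped zfill row
theorem pvRow_eq (n : Int) (hn : 1 ≤ n) (cs : List Char) (hne : cs ≠ [])
    (hs : ¬(cs.head hne = '+' ∨ cs.head hne = '-')) :
    decode_row (padLoop n (PySem.List.len (cs.map PyBox.strc)) (cs.map PyBox.strc))
      = String.ofList ((PySem.Chars.zfill cs n).map (fun c => if c = '1' then '#' else ' ')) := by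
  rcases cs with _ | ⟨c, rest⟩
  · cases hne rfl
  · rw [List.head_cons] at hs
    rw [pvPadLoop_eq, pvDecodeRow_eq, pvZfill_no_sign c rest n hs]
    congr 1
    rw [List.map_append, List.map_append, List.map_replicate, List.map_replicate,
      List.map_map]
    have hlen : PySem.List.len ((c :: rest).map PyBox.strc) = (((c :: rest).length : Nat) : Int) := by
      simp [PySem.List.len_eq]
    have hcnt : (n - PySem.List.len ((c :: rest).map PyBox.strc)).toNat
        = n.toNat - (c :: rest).length := by
      rw [hlen]; omega
    rw [hcnt]
    simp [PyBox.strc.injEq]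

theorem pvMain : ∀ (n : Int) (arr_1 : List Int) (arr_2 : List Int), Pre_solution n arr_1 arr_2 → solution n arr_1 arr_2 = solution_alt n arr_1 arr_2 := by
  intro n a1 a2 hpre
  obtain ⟨h1, h2⟩ := hpre
  unfold solution solution_alt
  simp only [PySem.List.foldl_append_singleton_eq_map, List.nil_append]
  apply List.map_congr_left
  intro i hi
  rw [PySem.List.mem_pyRange_one] at hi
  obtain ⟨hi0, hin⟩ := hi
  have hn1 : 1 ≤ n := by omega
  rw [PySem.List.pyGet?_eq_some_getElem a1 hi0 (by omega),
    PySem.List.pyGet?_eq_some_getElem a2 hi0 (by omega)]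
  simp only [Option.getD_some]
  set v := PySem.Int.bor a1[i.toNat] a2[i.toNat] with hv
  rw [show ((2 : Int)) = ((2 : Nat) : Int) from rfl, PySem.List.slice_from_natCast,
    PySem.List.slice_from_natCast, PySem.Int.toList_pyBin, ← List.map_drop]
  -- the sliced character list bin(v)[2:] is nonempty and never starts with a sign
  have hcs : ∃ hne : (PySem.Int.toBinChars0b v).drop 2 ≠ [],
      ¬(((PySem.Int.toBinChars0b v).drop 2).head hne = '+'
        ∨ ((PySem.Int.toBinChars0b v).drop 2).head hne = '-') := by
    rw [PySem.Int.toBinChars0b]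
    by_cases hv0 : v < 0
    · rw [if_pos hv0]
      simp only [List.drop_succ_cons, List.drop_zero]
      exact ⟨by simp, by simp⟩
    · rw [if_neg hv0]
      simp only [List.drop_succ_cons, List.drop_zero]
      rw [pvToDigits_eq_pvBits]
      refine ⟨pvBits_ne_nil v.toNat, ?_⟩
      have hmem := List.head_mem (pvBits_ne_nil v.toNat)
      rcases pvBits_mem v.toNat _ hmem with h0 | h0 <;> rw [h0] <;> decide
  obtain ⟨hne, hs⟩ := hcs
  exact pvRow_eq n hn1 _ hne hs

-- ===== VERDICT (by name: the statement is the Claim_ definition above) =====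
theorem solution_spec : Claim_equal_solution := by
  intro n arr_1 arr_2 _ hpre
  unfold Spec_solution
  exact pvMain n arr_1 arr_2 hpre
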